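-- pv_equiv track=rewrite | github.com/Anubhav299/DS | Hansraj College/Semester 6 (Core)/Anubhav/IPV.py | convert_to_decimal
-- ===== SOURCE A (Python) =====
-- def convert_to_decimal(address):
--     parts = address.split('.')
--     decimal_parts = []
--     for item in parts:
--         l = len(item)
--         s = 0
--         for i in range(0,l):
--             p = l-1-i
--             s = int(item[i])*(2**p)+s
--         decimal_parts.append(str(s))
--     return '.'.join(decimal_parts)
-- ===== SOURCE B (Python) =====
-- def convert_to_decimal(address):
--     out = []
--     for item in address.split('.'):
--         s = 0
--         for ch in item:
--             s = s * 2 + int(ch)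
--         out.append(str(s))
--     return '.'.join(out)
-- ===== Notes on version B (the rewrite author's own statement) =====
-- stated objective: faster
-- what changed: Each part is evaluated by Horner's rule with a single accumulator (s = s*2 + digit) instead of summing digit*2**(l-1-i) with a fresh power for every position.
import Mathlib
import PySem

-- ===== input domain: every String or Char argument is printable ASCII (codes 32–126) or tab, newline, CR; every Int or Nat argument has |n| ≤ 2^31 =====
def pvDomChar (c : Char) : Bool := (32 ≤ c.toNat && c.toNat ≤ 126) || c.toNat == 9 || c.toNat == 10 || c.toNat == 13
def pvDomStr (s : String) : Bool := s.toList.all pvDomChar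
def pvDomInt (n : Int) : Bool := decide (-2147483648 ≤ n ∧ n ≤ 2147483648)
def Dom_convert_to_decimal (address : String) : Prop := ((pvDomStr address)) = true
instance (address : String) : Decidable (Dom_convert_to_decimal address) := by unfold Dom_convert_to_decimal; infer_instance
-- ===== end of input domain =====

-- B evaluates each dot-separated part by Horner's rule (one running accumulator scaled by 2)
-- instead of A's per-position digit*2**(l-1-i) powers; equal return values on Pre_.

-- ===== PORT A =====
-- A-side helper: body of A's loop over parts (l, the power-sum loop, str(s))
def pvAPart (item : String) : String :=
  let l : Int := PySem.Str.len item
  let s : Int := (PySem.List.pyRange 0 l 1).foldl (fun s i =>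
    ((PySem.Int.ofChars? [(PySem.Str.pyGet? item i).getD ' ']).getD 0)
      * 2 ^ (l - 1 - i).toNat + s) 0
  PySem.Int.toStr s

def convert_to_decimal (address : String) : String :=
  let parts := (PySem.Str.split? address ".").getD []
  let decimal_parts : List String := parts.foldl (fun acc item => acc ++ [pvAPart item]) []
  PySem.Str.join "." decimal_parts

-- ===== PORT B =====
def convert_to_decimal_alt (address : String) : String :=
  PySem.Str.join "." (((PySem.Str.split? address ".").getD []).map (fun item =>
    PySem.Int.toStr (item.toList.foldl
      (fun s c => s * 2 + (PySem.Int.ofChars? [c]).getD 0) 0)))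

-- ===== PRECONDITION & SPEC =====
-- Pre_: Python A raises ValueError (int(ch) on a non-digit) unless every character is a decimal digit or a dot separator.
def Pre_convert_to_decimal (address : String) : Prop :=
  address.toList.all (fun c => c.isDigit || c == '.') = true
instance (address : String) : Decidable (Pre_convert_to_decimal address) := by
  unfold Pre_convert_to_decimal; infer_instance
def pvWitness_convert_to_decimal : String := "10.11"

def Spec_convert_to_decimal (address : String) (out : String) : Prop := out = convert_to_decimal_alt address
instance (address : String) (out : String) : Decidable (Spec_convert_to_decimal address out) := by unfold Spec_convert_to_decimal; infer_instance

-- ===== CLAIM (what is proved, stated in full; the proofs are below) =====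
def Claim_equal_convert_to_decimal : Prop := ∀ (address : String), Dom_convert_to_decimal address → Pre_convert_to_decimal address → Spec_convert_to_decimal address (convert_to_decimal address)

-- ===== LEMMAS AND PROOFS =====

-- digit value used by both ports
def pvD (c : Char) : Int := (PySem.Int.ofChars? [c]).getD 0

-- a fold that only adds is init + a sum
theorem pv_foldl_add_sum {α : Type} (xs : List α) (h : α → Int) (init : Int) :
    xs.foldl (fun s x => h x + s) init = init + (xs.map h).sum := by
  induction xs generalizing init with
  | nil => simp
  | cons x xs ih => simp [ih]; ring

-- Horner's fold equals the positional-weight sum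
theorem pv_horner_eq_sum (cs : List Char) (init : Int) :
    cs.foldl (fun s c => s * 2 + pvD c) init
      = init * 2 ^ cs.length
        + ((List.range cs.length).map
            (fun k => pvD (cs.getD k ' ') * 2 ^ (cs.length - 1 - k))).sum := by
  induction cs generalizing init with
  | nil => simp
  | cons c cs ih =>
    simp only [List.foldl_cons, ih, List.length_cons, List.range_succ_eq_map,
      List.map_cons, List.map_map, List.sum_cons]
    have : ∀ k, (Function.comp (fun k => pvD ((c :: cs).getD k ' ') * 2 ^ (cs.length + 1 - 1 - k)) Nat.succ) k
        = (fun k => pvD (cs.getD k ' ') * 2 ^ (cs.length - 1 - k)) k := by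
      intro k; simp [Function.comp, List.getD]; omega
    rw [List.map_congr_left (fun k _ => this k)]
    simp [List.getD]
    ring

-- per-part: A's inner loop value = B's Horner value
theorem pv_part_eq (item : String) :
    (PySem.List.pyRange 0 (PySem.Str.len item) 1).foldl (fun s i =>
      ((PySem.Int.ofChars? [(PySem.Str.pyGet? item i).getD ' ']).getD 0)
        * 2 ^ ((PySem.Str.len item) - 1 - i).toNat + s) 0
    = item.toList.foldl (fun s c => s * 2 + (PySem.Int.ofChars? [c]).getD 0) 0 := by
  rw [pv_foldl_add_sum]
  rw [show (PySem.Str.len item) = (item.toList.length : Int) from by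
    simp [PySem.Str.len_eq]]
  rw [PySem.List.pyRange_one, List.map_map]
  have h2 : (item.toList.foldl (fun s c => s * 2 + (PySem.Int.ofChars? [c]).getD 0) 0)
      = item.toList.foldl (fun s c => s * 2 + pvD c) 0 := rfl
  rw [h2, pv_horner_eq_sum]
  simp only [Int.sub_zero, Int.toNat_natCast, zero_mul, zero_add]
  congr 1
  apply List.map_congr_left
  intro k hk
  simp only [List.mem_range] at hk
  simp only [Function.comp_apply, PySem.Str.pyGet?_natCast, pvD]
  rw [List.getElem?_eq_getElem hk, Option.getD_some, List.getD_eq_getElem _ _ hk]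
  congr 2
  omega

-- ===== VERDICT (by name: the statement is the Claim_ definition above) =====
theorem convert_to_decimal_spec : Claim_equal_convert_to_decimal := by
  intro address _ _
  unfold Spec_convert_to_decimal convert_to_decimal convert_to_decimal_alt
  simp only [PySem.List.foldl_append_singleton_eq_map]
  congr 1
  apply List.map_congr_left
  intro item _
  exact congrArg PySem.Int.toStr (pv_part_eq item)
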